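-- pv_equiv track=rewrite | github.com/ziyang-arch/HolisticTraceAnalysis | hta/analyzers/idleness_analysis.py | find_repeated_subsequence
-- ===== SOURCE A (Python) =====
-- def find_repeated_subsequence(sequence, subsequence_length, repeat_count):
--     for start in range(len(sequence) - subsequence_length * repeat_count + 1):
--         candidate = sequence[start : start + subsequence_length]
--         count = 1
--         for i in range(start + subsequence_length, len(sequence) - subsequence_length + 1):
--             if sequence[i : i + subsequence_length] == candidate:
--                 count += 1
--                 if count == repeat_count:
--                     return candidate
--     return None
-- ===== SOURCE B (Python) =====
-- def find_repeated_subsequence(sequence, subsequence_length, repeat_count):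
--     # B: index every window position by its contents in one pass, then for each
--     # candidate start count the later occurrences with a binary search over that
--     # window's ascending position list, instead of rescanning all later windows.
--     if repeat_count < 2:
--         return None  # a repetition needs at least two occurrences
--     n = len(sequence)
--     L = subsequence_length
--     limit = n - L * repeat_count + 1
--     if limit <= 0:
--         return None  # no start could fit repeat_count copies
--     positions = {}
--     for i in range(n - L + 1):
--         key = tuple(sequence[i : i + L])
--         positions.setdefault(key, []).append(i)
--     needed = repeat_count - 1
--     for start in range(limit):
--         occ = positions.get(tuple(sequence[start : start + L]), [])
--         t = start + L
--         lo, hi = 0, len(occ)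
--         while lo < hi:
--             mid = (lo + hi) // 2
--             if occ[mid] < t:
--                 lo = mid + 1
--             else:
--                 hi = mid
--         if len(occ) - lo >= needed:
--             return sequence[start : start + L]
--     return None
-- ===== Notes on version B (the rewrite author's own statement) =====
-- stated objective: alternative
-- what changed: B builds, in one pass, an index from window contents to the ascending list of positions where that window occurs, and for each candidate start counts the later occurrences with a binary search over that list, instead of A's rescan of every later window for every start; it trades A's instant early return on immediately-repeating inputs for not paying the quadratic rescan when repeats are far away.
-- outside the precondition, e.g. on find_repeated_subsequence([7], -2, 6): A returns [], B returns None
import Mathlib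
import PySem

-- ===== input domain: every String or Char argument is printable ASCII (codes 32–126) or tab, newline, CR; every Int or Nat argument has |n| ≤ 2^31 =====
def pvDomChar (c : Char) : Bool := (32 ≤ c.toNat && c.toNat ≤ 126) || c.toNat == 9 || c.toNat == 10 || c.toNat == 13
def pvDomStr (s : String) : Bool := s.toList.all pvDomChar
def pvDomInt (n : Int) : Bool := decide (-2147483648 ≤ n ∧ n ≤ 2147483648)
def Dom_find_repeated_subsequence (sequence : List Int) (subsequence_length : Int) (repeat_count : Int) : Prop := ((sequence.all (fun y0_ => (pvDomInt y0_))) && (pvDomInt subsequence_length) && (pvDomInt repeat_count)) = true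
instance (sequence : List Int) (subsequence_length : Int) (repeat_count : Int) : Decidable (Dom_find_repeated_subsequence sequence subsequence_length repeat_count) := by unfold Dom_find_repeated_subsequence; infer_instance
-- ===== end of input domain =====

-- B replaces A's rescan of all later windows for every start by a one-pass index
-- from window contents to ascending occurrence positions plus a binary search per start.

-- ===== PORT A =====
-- inner loop: 'for i in range(start+subsequence_length, len(sequence)-subsequence_length+1): …'
def pvAInner (seq : List Int) (L R : Int) (cand : List Int) (is : List Int) (count : Int) : Option (List Int) :=
  match is with
  | [] => none
  | i :: rest =>
      if PySem.List.slice seq (some i) (some (i + L)) = cand then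
        (if count + 1 = R then some cand
         else pvAInner seq L R cand rest (count + 1))
      else pvAInner seq L R cand rest count

-- outer loop: 'for start in range(len(sequence) - subsequence_length*repeat_count + 1): …'
def pvAOuter (seq : List Int) (L R : Int) (starts : List Int) : Option (List Int) :=
  match starts with
  | [] => none
  | s :: rest =>
      let cand := PySem.List.slice seq (some s) (some (s + L))
      match pvAInner seq L R cand (PySem.List.pyRange (s + L) ((seq.length : Int) - L + 1)) 1 with
      | some v => some v
      | none => pvAOuter seq L R rest

def find_repeated_subsequence (sequence : List Int) (subsequence_length : Int) (repeat_count : Int) : Option (List Int) :=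
  pvAOuter sequence subsequence_length repeat_count
    (PySem.List.pyRange 0 ((sequence.length : Int) - subsequence_length * repeat_count + 1))

-- ===== PORT B =====
-- tuple(sequence[i : i + L])
def pvWindow (seq : List Int) (L i : Int) : List Int := PySem.List.slice seq (some i) (some (i + L))

-- 'positions[key] = positions.get(key, []) + [i]' over all window positions
def pvBuild (seq : List Int) (L : Int) : PySem.Dict (List Int) (List Int) :=
  (PySem.List.pyRange 0 ((seq.length : Int) - L + 1)).foldl
    (fun d i => d.modify (pvWindow seq L i) [] (fun v => v ++ [i])) PySem.Dict.empty

-- the hand-written 'while lo < hi' binary search of Source B; occ[mid] via pyGetD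
-- (the index is always in range when called, so the default 0 is never read)
def pvBSearch (occ : List Int) (t lo hi : Int) : Int :=
  if h : lo < hi then
    let mid := PySem.Int.floordiv (lo + hi) 2
    if PySem.List.pyGetD occ mid 0 < t then pvBSearch occ t (mid + 1) hi
    else pvBSearch occ t lo mid
  else lo
termination_by (hi - lo).toNat
decreasing_by
  all_goals
    have h2 : PySem.Int.floordiv (lo + hi) 2 = (lo + hi) / 2 :=
      PySem.Int.floordiv_eq_ediv_of_pos (by norm_num)
    simp only [h2]
    omega

-- 'for start in range(n - L*repeat_count + 1): …'
def pvBLoop (seq : List Int) (L R : Int) (d : PySem.Dict (List Int) (List Int)) (starts : List Int) : Option (List Int) :=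
  match starts with
  | [] => none
  | s :: rest =>
      let cand := pvWindow seq L s
      let occ := d.getD cand []
      let lo := pvBSearch occ (s + L) 0 (occ.length : Int)
      if (occ.length : Int) - lo ≥ R - 1 then some cand
      else pvBLoop seq L R d rest

def find_repeated_subsequence_alt (sequence : List Int) (subsequence_length : Int) (repeat_count : Int) : Option (List Int) :=
  if repeat_count < 2 then none
  else if (sequence.length : Int) - subsequence_length * repeat_count + 1 ≤ 0 then none
  else
    pvBLoop sequence subsequence_length repeat_count (pvBuild sequence subsequence_length)
      (PySem.List.pyRange 0 ((sequence.length : Int) - subsequence_length * repeat_count + 1))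

-- ===== PRECONDITION & SPEC =====
-- Pre_ restricts to the natural domain of nonnegative window lengths: for negative
-- subsequence_length Python's negative slice indices make A count phantom empty windows
-- at negative positions, behaviour no caller of this helper can mean.
def Pre_find_repeated_subsequence (sequence : List Int) (subsequence_length : Int) (repeat_count : Int) : Prop :=
  0 ≤ subsequence_length
instance (sequence : List Int) (subsequence_length : Int) (repeat_count : Int) : Decidable (Pre_find_repeated_subsequence sequence subsequence_length repeat_count) := by unfold Pre_find_repeated_subsequence; infer_instance

def pvWitness_find_repeated_subsequence : List Int × Int × Int := ([1, 1], 1, 2)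

def Spec_find_repeated_subsequence (sequence : List Int) (subsequence_length : Int) (repeat_count : Int) (out : Option (List Int)) : Prop := out = find_repeated_subsequence_alt sequence subsequence_length repeat_count
instance (sequence : List Int) (subsequence_length : Int) (repeat_count : Int) (out : Option (List Int)) : Decidable (Spec_find_repeated_subsequence sequence subsequence_length repeat_count out) := by unfold Spec_find_repeated_subsequence; infer_instance

-- ===== CLAIM (what is proved, stated in full; the proofs are below) =====
def Claim_equal_find_repeated_subsequence : Prop := ∀ (sequence : List Int) (subsequence_length : Int) (repeat_count : Int), Dom_find_repeated_subsequence sequence subsequence_length repeat_count → Pre_find_repeated_subsequence sequence subsequence_length repeat_count → Spec_find_repeated_subsequence sequence subsequence_length repeat_count (find_repeated_subsequence sequence subsequence_length repeat_count)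

-- ===== LEMMAS AND PROOFS =====

-- number of later windows equal to the candidate, as A's inner loop counts them
def pvMatches (seq : List Int) (L : Int) (cand : List Int) (is : List Int) : Nat :=
  (is.filter (fun i => pvWindow seq L i == cand)).length
lemma pvAInner_eq (seq : List Int) (L R : Int) (cand : List Int) :
    ∀ (is : List Int) (count : Int),
      pvAInner seq L R cand is count =
        if count < R ∧ R - count ≤ (pvMatches seq L cand is : Int) then some cand else none := by
  intro is
  induction is with
  | nil =>
      intro count
      rw [if_neg]
      · rfl
      · rintro ⟨h1, h2⟩
        simp [pvMatches] at h2
        omega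
  | cons i rest ih =>
      intro count
      by_cases hm : PySem.List.slice seq (some i) (some (i + L)) = cand
      · have hfil : pvMatches seq L cand (i :: rest) = pvMatches seq L cand rest + 1 := by
          simp [pvMatches, pvWindow, hm]
        by_cases hc : count + 1 = R
        · rw [if_pos]
          · simp [pvAInner, hm, hc]
          · constructor
            · omega
            · rw [hfil]; push_cast; omega
        · rw [pvAInner, if_pos hm, if_neg hc, ih]
          rw [hfil]
          split_ifs with h1 h2 h2 <;> try rfl
          · exfalso; push_cast at h1 h2; omega
          · exfalso; push_cast at h1 h2; omega
      · have hfil : pvMatches seq L cand (i :: rest) = pvMatches seq L cand rest := by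
          simp [pvMatches, pvWindow, hm]
        rw [pvAInner, if_neg hm, ih, hfil]
lemma pvAOuter_eq (seq : List Int) (L R : Int) : ∀ (starts : List Int),
    pvAOuter seq L R starts =
      (starts.find? (fun s => decide (1 < R ∧ R - 1 ≤
        (pvMatches seq L (pvWindow seq L s)
          (PySem.List.pyRange (s + L) ((seq.length : Int) - L + 1)) : Int)))).map
        (fun s => pvWindow seq L s) := by
  intro starts
  induction starts with
  | nil => rfl
  | cons s rest ih =>
      rw [pvAOuter, pvAInner_eq]
      by_cases h : (1 : Int) < R ∧ R - 1 ≤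
          (pvMatches seq L (pvWindow seq L s)
            (PySem.List.pyRange (s + L) ((seq.length : Int) - L + 1)) : Int)
      · rw [List.find?_cons_of_pos (by simpa using h)]
        rw [if_pos ⟨by omega, by simpa [pvWindow] using h.2⟩]
        rfl
      · rw [List.find?_cons_of_neg (by simpa using h)]
        rw [if_neg (fun hc => h ⟨by omega, by simpa [pvWindow] using hc.2⟩)]
        exact ih
lemma pvBuild_getD (seq : List Int) (L : Int) (w : List Int) :
    (pvBuild seq L).getD w [] =
      (PySem.List.pyRange 0 ((seq.length : Int) - L + 1)).filter (fun i => pvWindow seq L i == w) := by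
  unfold pvBuild
  have hmap : (PySem.List.pyRange 0 ((seq.length : Int) - L + 1)).foldl
      (fun d i => d.modify (pvWindow seq L i) [] (fun v => v ++ [i])) PySem.Dict.empty =
      ((PySem.List.pyRange 0 ((seq.length : Int) - L + 1)).map (fun i => (pvWindow seq L i, i))).foldl
      (fun d p => d.modify p.1 [] (fun v => v ++ [p.2])) PySem.Dict.empty := by
    rw [List.foldl_map]
  rw [hmap, PySem.Dict.getD_foldl_modify_append, PySem.Dict.getD_empty, List.filter_map,
    List.map_map]
  simp [Function.comp_def]
lemma pvCountPrefix (t : Int) : ∀ (l : List Int), l.Pairwise (· ≤ ·) →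
    ∀ (i : Nat) (hi : i < l.length),
      (l[i] < t ↔ i < (l.filter (fun x => decide (x < t))).length) := by
  intro l
  induction l with
  | nil => intro _ i hi; simp at hi
  | cons a l ih =>
      intro hp i hi
      have ha : ∀ b ∈ l, a ≤ b := (List.pairwise_cons.mp hp).1
      have hl : l.Pairwise (· ≤ ·) := (List.pairwise_cons.mp hp).2
      by_cases hat : a < t
      · rw [List.filter_cons_of_pos (by simpa using hat)]
        cases i with
        | zero => simpa using hat
        | succ j =>
            have hj : j < l.length := by simpa using hi
            simpa using ih hl j hj
      · have hnil : l.filter (fun x => decide (x < t)) = [] := by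
          rw [List.filter_eq_nil_iff]
          intro b hb
          simp only [decide_eq_true_eq]
          exact fun hbt => hat (lt_of_le_of_lt (ha b hb) hbt)
        rw [List.filter_cons_of_neg (by simpa using hat), hnil]
        simp only [List.length_nil, Nat.not_lt_zero, iff_false, not_lt]
        cases i with
        | zero => simpa using hat
        | succ j =>
            have hj : j < l.length := by simpa using hi
            have : a ≤ l[j] := ha _ (List.getElem_mem hj)
            simp only [List.getElem_cons_succ]
            omega
lemma pvBSearch_eq (occ : List Int) (t : Int) (h : occ.Pairwise (· ≤ ·)) :
    ∀ (lo hi : Int), 0 ≤ lo → hi ≤ (occ.length : Int) →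
      lo ≤ ((occ.filter (fun x => decide (x < t))).length : Int) →
      ((occ.filter (fun x => decide (x < t))).length : Int) ≤ hi →
      pvBSearch occ t lo hi = ((occ.filter (fun x => decide (x < t))).length : Int) := by
  have hclen : (occ.filter (fun x => decide (x < t))).length ≤ occ.length :=
    List.length_filter_le _ _
  suffices H : ∀ (k : Nat) (lo hi : Int), (hi - lo).toNat ≤ k → 0 ≤ lo →
      hi ≤ (occ.length : Int) →
      lo ≤ ((occ.filter (fun x => decide (x < t))).length : Int) →
      ((occ.filter (fun x => decide (x < t))).length : Int) ≤ hi →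
      pvBSearch occ t lo hi = ((occ.filter (fun x => decide (x < t))).length : Int) by
    intro lo hi h0 h1 h2 h3
    exact H (hi - lo).toNat lo hi le_rfl h0 h1 h2 h3
  intro k
  induction k with
  | zero =>
      intro lo hi hk h0 h1 h2 h3
      rw [pvBSearch, dif_neg (by omega)]
      omega
  | succ k ih =>
      intro lo hi hk h0 h1 h2 h3
      by_cases hlh : lo < hi
      · rw [pvBSearch, dif_pos hlh]
        have hm2 : PySem.Int.floordiv (lo + hi) 2 = (lo + hi) / 2 :=
          PySem.Int.floordiv_eq_ediv_of_pos (by norm_num)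
        set mid := PySem.Int.floordiv (lo + hi) 2 with hmid
        have hmb : lo ≤ mid ∧ mid < hi := by omega
        have hmr : mid < (occ.length : Int) := by omega
        show (if PySem.List.pyGetD occ mid 0 < t then pvBSearch occ t (mid + 1) hi
          else pvBSearch occ t lo mid) = ((occ.filter (fun x => decide (x < t))).length : Int)
        rw [PySem.List.pyGetD_eq_getElem occ 0 (by omega) hmr]
        have hiff := pvCountPrefix t occ h mid.toNat (by omega)
        by_cases hcmp : occ[mid.toNat] < t
        · rw [if_pos hcmp]
          have : mid.toNat < (occ.filter (fun x => decide (x < t))).length := hiff.mp hcmp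
          exact ih (mid + 1) hi (by omega) (by omega) h1 (by omega) h3
        · rw [if_neg hcmp]
          have : ¬ mid.toNat < (occ.filter (fun x => decide (x < t))).length :=
            fun hc => hcmp (hiff.mpr hc)
          exact ih lo mid (by omega) h0 (by omega) h2 (by omega)
      · rw [pvBSearch, dif_neg hlh]
        omega
lemma pvBLoop_eq (seq : List Int) (L R : Int) (d : PySem.Dict (List Int) (List Int)) :
    ∀ (starts : List Int),
      pvBLoop seq L R d starts =
        (starts.find? (fun s => decide (((d.getD (pvWindow seq L s) []).length : Int) -
            pvBSearch (d.getD (pvWindow seq L s) []) (s + L) 0 ((d.getD (pvWindow seq L s) []).length : Int) ≥ R - 1))).map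
          (fun s => pvWindow seq L s) := by
  intro starts
  induction starts with
  | nil => rfl
  | cons s rest ih =>
      rw [pvBLoop]
      by_cases h : ((d.getD (pvWindow seq L s) []).length : Int) -
          pvBSearch (d.getD (pvWindow seq L s) []) (s + L) 0 ((d.getD (pvWindow seq L s) []).length : Int) ≥ R - 1
      · rw [List.find?_cons_of_pos (by simpa using h), if_pos h]
        rfl
      · rw [List.find?_cons_of_neg (by simpa using h), if_neg h]
        exact ih

lemma pvFind?_congr {α : Type} (p q : α → Bool) : ∀ (l : List α),
    (∀ x ∈ l, p x = q x) → l.find? p = l.find? q := by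
  intro l
  induction l with
  | nil => intro _; rfl
  | cons a l ih =>
      intro hpq
      have ha := hpq a (List.mem_cons_self)
      by_cases h : p a = true
      · rw [List.find?_cons_of_pos h, List.find?_cons_of_pos (ha ▸ h)]
      · rw [List.find?_cons_of_neg (by simpa using h), List.find?_cons_of_neg (by rw [← ha]; simpa using h)]
        exact ih (fun x hx => hpq x (List.mem_cons_of_mem _ hx))
lemma pvCond_iff (seq : List Int) (L R s : Int) (hL : 0 ≤ L) (hR : 2 ≤ R)
    (hs0 : 0 ≤ s) (hs1 : s < (seq.length : Int) - L * R + 1) :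
    (((pvBuild seq L).getD (pvWindow seq L s) []).length : Int) -
        pvBSearch ((pvBuild seq L).getD (pvWindow seq L s) []) (s + L) 0
          (((pvBuild seq L).getD (pvWindow seq L s) []).length : Int) ≥ R - 1 ↔
      (1 < R ∧ R - 1 ≤
        (pvMatches seq L (pvWindow seq L s)
          (PySem.List.pyRange (s + L) ((seq.length : Int) - L + 1)) : Int)) := by
  have ht0 : (0 : Int) ≤ s + L := by omega
  have htm : s + L ≤ (seq.length : Int) - L + 1 := by
    have hLR : L * 1 ≤ L * (R - 1) := by
      apply mul_le_mul_of_nonneg_left (by omega) hL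
    have hmul : L * R = L * (R - 1) + L := by ring
    omega
  have hsplit := PySem.List.pyRange_one_append 0 (s + L) ((seq.length : Int) - L + 1) ht0 htm
  have hocc : (pvBuild seq L).getD (pvWindow seq L s) [] =
      (PySem.List.pyRange 0 ((seq.length : Int) - L + 1)).filter
        (fun i => pvWindow seq L i == pvWindow seq L s) := pvBuild_getD seq L _
  rw [hocc, hsplit, List.filter_append]
  set p := fun i : Int => pvWindow seq L i == pvWindow seq L s with hp
  set low := (PySem.List.pyRange 0 (s + L)).filter p with hlow
  set high := (PySem.List.pyRange (s + L) ((seq.length : Int) - L + 1)).filter p with hhigh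
  have hsort : (low ++ high).Pairwise (· ≤ ·) := by
    have h1 : ((PySem.List.pyRange 0 ((seq.length : Int) - L + 1)).filter p).Pairwise (· < ·) :=
      List.Pairwise.sublist List.filter_sublist (PySem.List.pairwise_lt_pyRange_one _ _)
    rw [hsplit, List.filter_append] at h1
    exact h1.imp le_of_lt
  have hcfil : (low ++ high).filter (fun x => decide (x < s + L)) = low := by
    rw [List.filter_append]
    have h1 : low.filter (fun x => decide (x < s + L)) = low := by
      apply List.filter_eq_self.mpr
      intro x hx
      have := (List.mem_filter.mp (hlow ▸ hx)).1
      have := PySem.List.mem_pyRange_one.mp this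
      simpa using this.2
    have h2 : high.filter (fun x => decide (x < s + L)) = [] := by
      apply List.filter_eq_nil_iff.mpr
      intro x hx
      have := (List.mem_filter.mp (hhigh ▸ hx)).1
      have := PySem.List.mem_pyRange_one.mp this
      simp only [decide_eq_true_eq]
      omega
    rw [h1, h2, List.append_nil]
  have hbs := pvBSearch_eq (low ++ high) (s + L) hsort 0 ((low ++ high).length : Int)
    le_rfl le_rfl (by positivity) (by exact_mod_cast Nat.cast_le.mpr (List.length_filter_le _ _))
  rw [hcfil] at hbs
  rw [hbs]
  have hmatch : pvMatches seq L (pvWindow seq L s)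
      (PySem.List.pyRange (s + L) ((seq.length : Int) - L + 1)) = high.length := rfl
  rw [hmatch]
  simp only [List.length_append]
  push_cast
  omega

-- ===== VERDICT (by name: the statement is the Claim_ definition above) =====
theorem find_repeated_subsequence_spec : Claim_equal_find_repeated_subsequence := by
  intro seq L R hdom hpre
  have hL : (0 : Int) ≤ L := hpre
  unfold Spec_find_repeated_subsequence
  unfold find_repeated_subsequence find_repeated_subsequence_alt
  by_cases hR : R < 2
  · rw [if_pos hR, pvAOuter_eq]
    have hnone : (PySem.List.pyRange 0 ((seq.length : Int) - L * R + 1)).find?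
        (fun s => decide (1 < R ∧ R - 1 ≤
          (pvMatches seq L (pvWindow seq L s)
            (PySem.List.pyRange (s + L) ((seq.length : Int) - L + 1)) : Int))) = none := by
      apply List.find?_eq_none.mpr
      intro x hx
      simp only [decide_eq_true_eq, not_and]
      intro h1
      omega
    rw [hnone]
    rfl
  · rw [if_neg hR, pvAOuter_eq]
    by_cases hlim : (seq.length : Int) - L * R + 1 ≤ 0
    · rw [if_pos hlim, PySem.List.pyRange_one_eq_nil (by omega)]
      rfl
    · rw [if_neg hlim, pvBLoop_eq]
      congr 1
      apply pvFind?_congr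
      intro x hx
      have hb := PySem.List.mem_pyRange_one.mp hx
      have hiff := pvCond_iff seq L R x hL (by omega) hb.1 (by omega)
      exact decide_eq_decide.mpr hiff.symm
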